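-- pv_equiv track=rewrite | github.com/luchoh/OB1 | recipes/document-import/benchmark-pdf-converters.py | markdown_stats
-- ===== SOURCE A (Python) =====
-- def markdown_stats(text: str) -> dict:
--     lines = text.splitlines()
--     stripped = [line.strip() for line in lines]
--     return {
--         "chars": len(text),
--         "lines": len(lines),
--         "nonempty_lines": sum(1 for line in stripped if line),
--         "heading_lines": sum(1 for line in stripped if line.startswith("#")),
--         "table_lines": sum(1 for line in stripped if "|" in line),
--         "list_lines": sum(1 for line in stripped if line.startswith(("- ", "* ", "1. ", "2. ", "3. "))),
--         "code_fences": sum(1 for line in stripped if line.startswith("```")),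
--     }
-- ===== SOURCE B (Python) =====
-- def markdown_stats(text: str) -> dict:
--     lines = text.splitlines()
--     nonempty = heading = table = listed = fence = 0
--     for raw in lines:
--         line = raw.strip()
--         if line:
--             nonempty += 1
--         if line.startswith("#"):
--             heading += 1
--         if "|" in line:
--             table += 1
--         if line.startswith(("- ", "* ", "1. ", "2. ", "3. ")):
--             listed += 1
--         if line.startswith("```"):
--             fence += 1
--     return {
--         "chars": len(text),
--         "lines": len(lines),
--         "nonempty_lines": nonempty,
--         "heading_lines": heading,
--         "table_lines": table,
--         "list_lines": listed,
--         "code_fences": fence,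
--     }
-- ===== Notes on version B (the rewrite author's own statement) =====
-- stated objective: alternative
-- what changed: Replaces the intermediate stripped list and seven separate counting scans with a single pass over the lines that strips each line once and maintains five counters.
import Mathlib
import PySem

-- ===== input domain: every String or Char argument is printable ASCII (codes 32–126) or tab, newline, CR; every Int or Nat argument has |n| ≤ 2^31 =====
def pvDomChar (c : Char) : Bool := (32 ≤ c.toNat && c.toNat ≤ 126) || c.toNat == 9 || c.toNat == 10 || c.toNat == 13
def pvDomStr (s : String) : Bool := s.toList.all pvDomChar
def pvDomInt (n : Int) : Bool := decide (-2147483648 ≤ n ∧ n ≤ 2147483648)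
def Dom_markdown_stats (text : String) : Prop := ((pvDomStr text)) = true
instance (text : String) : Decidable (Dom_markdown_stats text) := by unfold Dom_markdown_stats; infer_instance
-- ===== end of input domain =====

-- B replaces A's stripped intermediate list and seven separate counting scans with one
-- fold over the lines carrying five counters (objective: alternative decomposition).


-- ===== PORT A =====
-- the five line predicates of the Python source (shared verbatim by both programs)
def mdNonempty (l : String) : Bool := l != ""
def mdHeading (l : String) : Bool := PySem.Str.startswith l "#"
def mdTable (l : String) : Bool := PySem.Str.isIn "|" l
def mdList (l : String) : Bool :=
  PySem.Str.startswith l "- " || PySem.Str.startswith l "* " ||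
  PySem.Str.startswith l "1. " || PySem.Str.startswith l "2. " ||
  PySem.Str.startswith l "3. "
def mdFence (l : String) : Bool := PySem.Str.startswith l "```"

def markdown_stats (text : String) : List (String × Int) :=
  let lines := PySem.Str.splitlines text
  let stripped := lines.map (fun line => PySem.Str.strip line)
  [("chars", (PySem.Str.len text : Int)),
   ("lines", (lines.length : Int)),
   ("nonempty_lines", (stripped.countP mdNonempty : Int)),
   ("heading_lines", (stripped.countP mdHeading : Int)),
   ("table_lines", (stripped.countP mdTable : Int)),
   ("list_lines", (stripped.countP mdList : Int)),
   ("code_fences", (stripped.countP mdFence : Int))]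

-- ===== PORT B =====
-- one pass over the raw lines, stripping each once, five Int counters in a tuple
def mdStep (acc : Int × Int × Int × Int × Int) (raw : String) : Int × Int × Int × Int × Int :=
  let line := PySem.Str.strip raw
  ((if mdNonempty line then acc.1 + 1 else acc.1),
   (if mdHeading line then acc.2.1 + 1 else acc.2.1),
   (if mdTable line then acc.2.2.1 + 1 else acc.2.2.1),
   (if mdList line then acc.2.2.2.1 + 1 else acc.2.2.2.1),
   (if mdFence line then acc.2.2.2.2 + 1 else acc.2.2.2.2))

def markdown_stats_alt (text : String) : List (String × Int) :=
  let lines := PySem.Str.splitlines text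
  let s := lines.foldl mdStep (0, 0, 0, 0, 0)
  [("chars", (PySem.Str.len text : Int)),
   ("lines", (lines.length : Int)),
   ("nonempty_lines", s.1),
   ("heading_lines", s.2.1),
   ("table_lines", s.2.2.1),
   ("list_lines", s.2.2.2.1),
   ("code_fences", s.2.2.2.2)]

-- ===== PRECONDITION & SPEC =====
def Spec_markdown_stats (text : String) (out : List (String × Int)) : Prop := out = markdown_stats_alt text
instance (text : String) (out : List (String × Int)) : Decidable (Spec_markdown_stats text out) := by unfold Spec_markdown_stats; infer_instance

-- ===== CLAIM (what is proved, stated in full; the proofs are below) =====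
def Claim_equal_markdown_stats : Prop := ∀ (text : String), Dom_markdown_stats text → Spec_markdown_stats text (markdown_stats text)

-- ===== LEMMAS AND PROOFS =====
theorem mdStep_foldl (ls : List String) (a b c d e : Int) :
    ls.foldl mdStep (a, b, c, d, e) =
      (a + ((ls.map (fun line => PySem.Str.strip line)).countP mdNonempty : Int),
       b + ((ls.map (fun line => PySem.Str.strip line)).countP mdHeading : Int),
       c + ((ls.map (fun line => PySem.Str.strip line)).countP mdTable : Int),
       d + ((ls.map (fun line => PySem.Str.strip line)).countP mdList : Int),
       e + ((ls.map (fun line => PySem.Str.strip line)).countP mdFence : Int)) := by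
  induction ls generalizing a b c d e with
  | nil => simp
  | cons x t ih =>
    simp only [List.foldl_cons, List.map_cons, List.countP_cons, mdStep, ih, Prod.mk.injEq]
    refine ⟨?_, ?_, ?_, ?_, ?_⟩ <;> split <;> push_cast <;> omega

-- ===== VERDICT (by name: the statement is the Claim_ definition above) =====
theorem markdown_stats_spec : Claim_equal_markdown_stats := by
  intro text _
  unfold Spec_markdown_stats markdown_stats markdown_stats_alt
  simp [mdStep_foldl]
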